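-- pv_equiv track=rewrite | github.com/anishkasachdeva/N-Gram_Language_Modeling | language_model.py | formTrigramMap
-- ===== SOURCE A (Python) =====
-- def formTrigramMap(tokens):
--     trigram_map = {}
--     for i in range(len(tokens)):
--         for j in range(len(tokens[i]) - 2):
--             a = tokens[i][j]
--             b = tokens[i][j+1]
--             c = tokens[i][j+2]
--
--             if a in trigram_map:
--                 if b in trigram_map[a]:
--                     if c in trigram_map[a][b]:
--                         trigram_map[a][b][c] += 1
--                     else:
--                         trigram_map[a][b][c] = 1
--                 else:
--                     trigram_map[a][b] = {}
--                     trigram_map[a][b][c] = 1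
--             else:
--                 trigram_map[a] = {}
--                 trigram_map[a][b] = {}
--                 trigram_map[a][b][c] = 1
--     return trigram_map
-- ===== SOURCE B (Python) =====
-- def formTrigramMap(tokens):
--     counts = {}
--     for sent in tokens:
--         for tri in zip(sent, sent[1:], sent[2:]):
--             counts[tri] = counts.get(tri, 0) + 1
--     trigram_map = {}
--     for (a, b, c), n in counts.items():
--         trigram_map.setdefault(a, {}).setdefault(b, {})[c] = n
--     return trigram_map
-- ===== Notes on version B (the rewrite author's own statement) =====
-- stated objective: alternative
-- what changed: A builds the nested trigram map in one pass with an auto-vivifying three-level if-cascade; B first counts trigrams (taken from zip(sent, sent[1:], sent[2:])) into a flat dict keyed by the (a,b,c) tuple, then reshapes that flat table into the nested map in a separate setdefault pass.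
import Mathlib
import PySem

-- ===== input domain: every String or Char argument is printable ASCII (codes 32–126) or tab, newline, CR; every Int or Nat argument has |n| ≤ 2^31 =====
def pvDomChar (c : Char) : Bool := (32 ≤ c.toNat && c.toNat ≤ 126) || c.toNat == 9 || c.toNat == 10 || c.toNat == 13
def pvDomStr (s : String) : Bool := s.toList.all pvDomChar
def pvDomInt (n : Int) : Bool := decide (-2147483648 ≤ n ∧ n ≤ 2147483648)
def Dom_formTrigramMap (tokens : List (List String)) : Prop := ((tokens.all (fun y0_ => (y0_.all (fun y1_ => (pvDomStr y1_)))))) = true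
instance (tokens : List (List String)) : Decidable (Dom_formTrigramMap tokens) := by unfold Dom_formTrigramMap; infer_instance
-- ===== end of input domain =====

-- B replaces A's one-pass auto-vivifying nested-dict loop by a flat trigram counter built in
-- one pass, followed by a separate reshape pass into the nested map (objective: alternative).

-- ===== PORT A =====
-- the nested map type: dict[str, dict[str, dict[str, int]]]
abbrev TMap := PySem.Dict String (PySem.Dict String (PySem.Dict String Int))

-- A's loop body: the if-cascade on 'a in trigram_map' / 'b in trigram_map[a]' / 'c in trigram_map[a][b]'
def trInc3 (m : TMap) (a b c : String) : TMap :=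
  match m.get? a with
  | some ma =>
    match ma.get? b with
    | some mab =>
      match mab.get? c with
      | some n => m.insert a (ma.insert b (mab.insert c (n + 1)))
      | none   => m.insert a (ma.insert b (mab.insert c 1))
    | none => m.insert a (ma.insert b ((PySem.Dict.empty : PySem.Dict String Int).insert c 1))
  | none =>
      m.insert a (((PySem.Dict.empty : PySem.Dict String (PySem.Dict String Int))).insert b
        ((PySem.Dict.empty : PySem.Dict String Int).insert c 1))

def formTrigramMap (tokens : List (List String)) : List (String × List (String × List (String × Int))) :=
  let tm : TMap :=
    (PySem.List.pyRange 0 (PySem.List.len tokens) 1).foldl (fun m i =>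
      (PySem.List.pyRange 0 (PySem.List.len (PySem.List.pyGetD tokens i []) - 2) 1).foldl (fun m j =>
        trInc3 m (PySem.List.pyGetD (PySem.List.pyGetD tokens i []) j "")
          (PySem.List.pyGetD (PySem.List.pyGetD tokens i []) (j + 1) "")
          (PySem.List.pyGetD (PySem.List.pyGetD tokens i []) (j + 2) "")) m) PySem.Dict.empty
  tm.items.map (fun p => (p.1, p.2.items.map (fun q => (q.1, q.2.items))))

-- ===== PORT B =====
-- counts[tri] = counts.get(tri, 0) + 1
def cntTri (d : PySem.Dict (String × String × String) Int) (t : String × String × String) :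
    PySem.Dict (String × String × String) Int :=
  d.insert t (d.getD t 0 + 1)

-- trigram_map.setdefault(a, {}).setdefault(b, {})[c] = n
def reIns (m : TMap) (p : (String × String × String) × Int) : TMap :=
  m.insert p.1.1 ((m.getD p.1.1 PySem.Dict.empty).insert p.1.2.1
    (((m.getD p.1.1 PySem.Dict.empty).getD p.1.2.1 PySem.Dict.empty).insert p.1.2.2 p.2))

def formTrigramMap_alt (tokens : List (List String)) : List (String × List (String × List (String × Int))) :=
  let counts : PySem.Dict (String × String × String) Int :=
    tokens.foldl (fun d sent =>
      (List.zip sent (List.zip (PySem.List.slice sent (some 1) none)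
        (PySem.List.slice sent (some 2) none))).foldl cntTri d) PySem.Dict.empty
  let tm : TMap := counts.items.foldl reIns PySem.Dict.empty
  tm.items.map (fun p => (p.1, p.2.items.map (fun q => (q.1, q.2.items))))

-- ===== PRECONDITION & SPEC =====
def Spec_formTrigramMap (tokens : List (List String)) (out : List (String × List (String × List (String × Int)))) : Prop := out = formTrigramMap_alt tokens
instance (tokens : List (List String)) (out : List (String × List (String × List (String × Int)))) : Decidable (Spec_formTrigramMap tokens out) := by unfold Spec_formTrigramMap; infer_instance

-- ===== CLAIM (what is proved, stated in full; the proofs are below) =====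
def Claim_equal_formTrigramMap : Prop := ∀ (tokens : List (List String)), Dom_formTrigramMap tokens → Spec_formTrigramMap tokens (formTrigramMap tokens)

-- ===== LEMMAS AND PROOFS =====

-- uncurried form of A's loop body; the list of trigrams of one sentence
def trStep (m : TMap) (t : String × String × String) : TMap := trInc3 m t.1 t.2.1 t.2.2

def tris (sent : List String) : List (String × String × String) :=
  List.zip sent (List.zip (sent.drop 1) (sent.drop 2))

-- "write v at path (a,b,c)", the common shape of both loop bodies; its read and membership companions
def pset (m : TMap) (t : String × String × String) (v : Int) : TMap :=
  m.insert t.1 ((m.getD t.1 PySem.Dict.empty).insert t.2.1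
    (((m.getD t.1 PySem.Dict.empty).getD t.2.1 PySem.Dict.empty).insert t.2.2 v))

def pget (m : TMap) (t : String × String × String) : Int :=
  ((m.getD t.1 PySem.Dict.empty).getD t.2.1 PySem.Dict.empty).getD t.2.2 0

def pmem (m : TMap) (t : String × String × String) : Prop :=
  m.contains t.1 = true ∧ (m.getD t.1 PySem.Dict.empty).contains t.2.1 = true ∧
    ((m.getD t.1 PySem.Dict.empty).getD t.2.1 PySem.Dict.empty).contains t.2.2 = true

theorem reIns_eq (m : TMap) (p : (String × String × String) × Int) : reIns m p = pset m p.1 p.2 := rfl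

theorem trStep_eq (m : TMap) (t : String × String × String) :
    trStep m t = pset m t (pget m t + 1) := by
  obtain ⟨a, b, c⟩ := t
  unfold trStep trInc3 pset pget
  rcases ha : m.get? a with _ | ma
  · simp [PySem.Dict.getD_of_get?_eq_none _ _ ha, PySem.Dict.getD_empty]
  · rcases hb : ma.get? b with _ | mab
    · simp [hb, PySem.Dict.getD_of_get?_eq_some _ _ ha, PySem.Dict.getD_of_get?_eq_none _ _ hb,
        PySem.Dict.getD_empty]
    · rcases hc : mab.get? c with _ | n
      · simp [hb, hc, PySem.Dict.getD_of_get?_eq_some _ _ ha, PySem.Dict.getD_of_get?_eq_some _ _ hb,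
          PySem.Dict.getD_of_get?_eq_none _ _ hc]
      · simp [hb, hc, PySem.Dict.getD_of_get?_eq_some _ _ ha, PySem.Dict.getD_of_get?_eq_some _ _ hb,
          PySem.Dict.getD_of_get?_eq_some _ _ hc]

-- two inserts at distinct keys commute when the first key is already present
theorem insert_comm_of_contains {κ ν : Type} [BEq κ] [LawfulBEq κ] (d : PySem.Dict κ ν)
    {k k' : κ} (v v' : ν) (hc : d.contains k = true) (hne : k' ≠ k) :
    (d.insert k v).insert k' v' = (d.insert k' v').insert k v := by
  apply PySem.Dict.ext
  by_cases hc' : d.contains k' = true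
  · rw [PySem.Dict.items_insert_of_contains _ v'
      (by rw [PySem.Dict.contains_insert]; simp [hc']),
      PySem.Dict.items_insert_of_contains _ v hc,
      PySem.Dict.items_insert_of_contains _ v
      (by rw [PySem.Dict.contains_insert]; simp [hc]),
      PySem.Dict.items_insert_of_contains _ v' hc',
      List.map_map, List.map_map]
    apply List.map_congr_left
    intro p _
    by_cases h1 : p.1 = k
    · simp [Function.comp, h1, Ne.symm hne]
    · by_cases h2 : p.1 = k'
      · simp [Function.comp, h2, hne]
      · simp [Function.comp, h1, h2]
  · have hck' : (d.insert k v).contains k' = false := by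
      rw [PySem.Dict.contains_insert]
      simp [hne, hc']
    have hck : (d.insert k' v').contains k = true := by
      rw [PySem.Dict.contains_insert]
      simp [hc]
    rw [PySem.Dict.items_insert_of_not_contains _ v' hck',
      PySem.Dict.items_insert_of_contains _ v hc,
      PySem.Dict.items_insert_of_contains _ v hck,
      PySem.Dict.items_insert_of_not_contains _ v' (by simpa using hc')]
    simp [hne]

theorem pset_pset_same (m : TMap) (t : String × String × String) (w v : Int) :
    pset (pset m t w) t v = pset m t v := by
  obtain ⟨a, b, c⟩ := t
  simp [pset, PySem.Dict.getD_insert_self, PySem.Dict.insert_insert_self]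

theorem pmem_pset_self (m : TMap) (t : String × String × String) (v : Int) : pmem (pset m t v) t := by
  obtain ⟨a, b, c⟩ := t
  refine ⟨?_, ?_, ?_⟩ <;>
    simp [pset, PySem.Dict.getD_insert_self, PySem.Dict.contains_insert_self]

theorem pmem_pset (m : TMap) (t t' : String × String × String) (v : Int) (h : pmem m t) :
    pmem (pset m t' v) t := by
  obtain ⟨a, b, c⟩ := t
  obtain ⟨a', b', c'⟩ := t'
  obtain ⟨h1, h2, h3⟩ := h
  by_cases hA : a' = a
  · subst hA
    by_cases hB : b' = b
    · subst hB
      by_cases hC : c' = c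
      · subst hC
        exact ⟨by simp [pset, PySem.Dict.contains_insert_self],
          by simp [pset, PySem.Dict.getD_insert_self, PySem.Dict.contains_insert_self],
          by simp [pset, PySem.Dict.getD_insert_self, PySem.Dict.contains_insert_self]⟩
      · refine ⟨by simp [pset, PySem.Dict.contains_insert_self], ?_, ?_⟩
        · simp [pset, PySem.Dict.getD_insert_self, PySem.Dict.contains_insert_self]
        · simp [pset, PySem.Dict.getD_insert_self, PySem.Dict.contains_insert, h3]
    · refine ⟨by simp [pset, PySem.Dict.contains_insert_self], ?_, ?_⟩
      · simp [pset, PySem.Dict.getD_insert_self, PySem.Dict.contains_insert, h2]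
      · simp [pset, PySem.Dict.getD_insert_self,
          PySem.Dict.getD_insert_of_ne _ _ _ (Ne.symm hB), h3]
  · refine ⟨?_, ?_, ?_⟩ <;>
      simp [pset, PySem.Dict.contains_insert, PySem.Dict.getD_insert_of_ne _ _ _ (Ne.symm hA),
        h1, h2, h3]

theorem pget_pset_self (m : TMap) (t : String × String × String) (v : Int) :
    pget (pset m t v) t = v := by
  obtain ⟨a, b, c⟩ := t
  simp [pset, pget, PySem.Dict.getD_insert_self]

theorem pget_pset_ne (m : TMap) {t t' : String × String × String} (v : Int) (h : t' ≠ t) :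
    pget (pset m t' v) t = pget m t := by
  obtain ⟨a, b, c⟩ := t
  obtain ⟨a', b', c'⟩ := t'
  by_cases hA : a' = a
  · subst hA
    by_cases hB : b' = b
    · subst hB
      have hC : c' ≠ c := by simpa [Prod.ext_iff] using h
      simp [pset, pget, PySem.Dict.getD_insert_self,
        PySem.Dict.getD_insert_of_ne _ _ _ (Ne.symm hC)]
    · simp [pset, pget, PySem.Dict.getD_insert_self,
        PySem.Dict.getD_insert_of_ne _ _ _ (Ne.symm hB)]
  · simp [pset, pget, PySem.Dict.getD_insert_of_ne _ _ _ (Ne.symm hA)]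

theorem pset_comm (m : TMap) {t t' : String × String × String} (v n : Int)
    (hm : pmem m t) (hne : t' ≠ t) :
    pset (pset m t v) t' n = pset (pset m t' n) t v := by
  obtain ⟨a, b, c⟩ := t
  obtain ⟨a', b', c'⟩ := t'
  obtain ⟨h1, h2, h3⟩ := hm
  by_cases hA : a' = a
  · subst hA
    by_cases hB : b' = b
    · subst hB
      have hC : c' ≠ c := by simpa [Prod.ext_iff] using hne
      simp only [pset, PySem.Dict.getD_insert_self, PySem.Dict.insert_insert_self]
      rw [insert_comm_of_contains _ _ _ h3 hC]
    · simp only [pset, PySem.Dict.getD_insert_self, PySem.Dict.insert_insert_self,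
        PySem.Dict.getD_insert_of_ne _ _ _ (Ne.symm hB),
        PySem.Dict.getD_insert_of_ne _ _ _ hB]
      rw [insert_comm_of_contains _ _ _ h2 hB]
  · simp only [pset, PySem.Dict.getD_insert_of_ne _ _ _ (Ne.symm hA),
      PySem.Dict.getD_insert_of_ne _ _ _ hA]
    rw [insert_comm_of_contains _ _ _ h1 hA]

-- folding reshape steps whose keys avoid t commutes with a pset at a path t already present
theorem foldl_reIns_pset (t : String × String × String) (v : Int) :
    ∀ (rest : List ((String × String × String) × Int)) (M : TMap), pmem M t →
      (∀ p ∈ rest, p.1 ≠ t) →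
      rest.foldl reIns (pset M t v) = pset (rest.foldl reIns M) t v := by
  intro rest
  induction rest with
  | nil => intro M _ _; rfl
  | cons p rest ih =>
    intro M hM hav
    have hp : p.1 ≠ t := hav p (by simp)
    simp only [List.foldl_cons, reIns_eq]
    rw [pset_comm M _ _ hM hp, ← reIns_eq]
    exact ih (reIns M p) (by rw [reIns_eq]; exact pmem_pset M t p.1 p.2 hM)
      (fun q hq => hav q (by simp [hq]))

-- replacing the value stored under the (unique) key t rewrites exactly the path t of the reshape
theorem foldl_reIns_replace (t : String × String × String) (v : Int) :
    ∀ (its : List ((String × String × String) × Int)) (m : TMap),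
      (its.map (·.1)).Nodup → t ∈ its.map (·.1) →
      (its.map (fun p => if p.1 == t then (t, v) else p)).foldl reIns m =
        pset (its.foldl reIns m) t v := by
  intro its
  induction its with
  | nil => intro m _ h; simp at h
  | cons p rest ih =>
    intro m hnd hmem
    rw [List.map_cons] at hnd hmem
    obtain ⟨pk, pn⟩ := p
    by_cases hp : pk = t
    · subst hp
      have hnr : pk ∉ rest.map (·.1) := (List.nodup_cons.mp hnd).1
      have hrest : rest.map (fun q => if q.1 == pk then (pk, v) else q) = rest := by
        calc rest.map (fun q => if q.1 == pk then (pk, v) else q)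
            = rest.map id := by
              apply List.map_congr_left
              intro q hq
              have hq1 : q.1 ≠ pk := fun h => hnr (h ▸ List.mem_map_of_mem hq)
              simp [hq1]
          _ = rest := List.map_id rest
      simp only [List.map_cons, beq_self_eq_true, ite_true, List.foldl_cons, hrest, reIns_eq]
      rw [show pset (List.foldl reIns (pset m (pk, pn).1 (pk, pn).2) rest) pk v
            = pset (List.foldl reIns (pset m pk pn) rest) pk v from rfl]
      rw [show (pset m (pk, v).1 (pk, v).2) = pset (pset m pk pn) pk v from
        (pset_pset_same m pk pn v).symm]
      exact foldl_reIns_pset pk v rest _ (pmem_pset_self m pk pn)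
        (fun q hq h => hnr (h ▸ List.mem_map_of_mem hq))
    · have hmem' : t ∈ rest.map (·.1) := by
        rcases List.mem_cons.mp hmem with h | h
        · exact absurd h.symm hp
        · exact h
      simp only [List.map_cons, List.foldl_cons, if_neg (by simp [hp] :
        ¬ (((pk, pn) : (String × String × String) × Int).1 == t) = true)]
      exact ih (reIns m (pk, pn)) (List.nodup_cons.mp hnd).2 hmem'

-- reshape of a counter insert = pset of the reshape
theorem reshape_insert (d : PySem.Dict (String × String × String) Int)
    (t : String × String × String) (v : Int) (hnd : d.keys.Nodup) :
    ((d.insert t v).items).foldl reIns PySem.Dict.empty =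
      pset (d.items.foldl reIns PySem.Dict.empty) t v := by
  by_cases hc : d.contains t = true
  · rw [PySem.Dict.items_insert_of_contains _ v hc]
    exact foldl_reIns_replace t v d.items _ hnd
      (show t ∈ d.keys from (PySem.Dict.contains_iff_mem_keys d t).mp hc)
  · rw [PySem.Dict.items_insert_of_not_contains _ v (by simpa using hc),
      List.foldl_append, List.foldl_cons, List.foldl_nil, reIns_eq]

-- the nested count at path t after A's loop is the number of occurrences of t
theorem pget_foldl_trStep (L : List (String × String × String)) (t : String × String × String) :
    pget (L.foldl trStep PySem.Dict.empty) t = (L.count t : Int) := by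
  induction L using List.reverseRecOn with
  | nil =>
    simp [pget, PySem.Dict.getD_empty]
  | append_singleton L t' ih =>
    rw [List.foldl_append, List.foldl_cons, List.foldl_nil, trStep_eq]
    by_cases h : t' = t
    · subst h
      rw [pget_pset_self, ih]
      simp
    · rw [pget_pset_ne _ _ h, ih]
      simp [List.count_append, h]

-- MAIN: reshape of the flat counter = A's one-pass nested fold
theorem reshape_counter (L : List (String × String × String)) :
    ((L.foldl cntTri PySem.Dict.empty).items).foldl reIns PySem.Dict.empty =
      L.foldl trStep PySem.Dict.empty := by
  induction L using List.reverseRecOn with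
  | nil => rfl
  | append_singleton L t ih =>
    rw [show cntTri = (fun (d : PySem.Dict (String × String × String) Int) x =>
      d.insert x (d.getD x 0 + 1)) from rfl] at *
    rw [List.foldl_append, List.foldl_cons, List.foldl_nil]
    rw [reshape_insert _ t _
      (PySem.Dict.nodup_keys_foldl_insert L _ _ PySem.Dict.nodup_keys_empty), ih]
    rw [List.foldl_append, List.foldl_cons, List.foldl_nil, trStep_eq, pget_foldl_trStep]
    congr 1
    rw [PySem.Dict.getD_foldl_insert_add_one]
    simp [PySem.Dict.getD_empty]

-- A-side glue: the inner index loop is the fold over the trigram list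
theorem tris_eq_map_range (sent : List String) :
    tris sent = (List.range (sent.length - 2)).map
      (fun j => (sent.getD j "", sent.getD (j + 1) "", sent.getD (j + 2) "")) := by
  apply List.ext_getElem
  · simp [tris]
    omega
  · intro i h1 h2
    simp only [tris] at h1 ⊢
    have hi : i < sent.length - 2 := by simp at h1; omega
    rw [List.getElem_zip, List.getElem_zip, List.getElem_map, List.getElem_range]
    simp only [List.getElem_drop]
    refine Prod.ext ?_ (Prod.ext ?_ ?_) <;> simp <;>
      rw [List.getElem?_eq_getElem (by omega)] <;> simp <;>
      exact getElem_congr_idx (by omega)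

theorem pyRange_sub_two (n : Nat) :
    PySem.List.pyRange 0 ((n : Int) - 2) 1 = (List.range (n - 2)).map (fun k : Nat => (k : Int)) := by
  by_cases h : 2 ≤ n
  · have : (n : Int) - 2 = ((n - 2 : Nat) : Int) := by omega
    rw [this, PySem.List.pyRange_zero_natCast]
  · have hn : n - 2 = 0 := by omega
    rw [hn]
    interval_cases n
    · decide
    · decide

theorem inner_loop_eq (sent : List String) (m : TMap) :
    (PySem.List.pyRange 0 (PySem.List.len sent - 2) 1).foldl (fun m j =>
        trInc3 m (PySem.List.pyGetD sent j "") (PySem.List.pyGetD sent (j + 1) "")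
          (PySem.List.pyGetD sent (j + 2) "")) m = (tris sent).foldl trStep m := by
  rw [PySem.List.len_eq, pyRange_sub_two, tris_eq_map_range, List.foldl_map, List.foldl_map]
  apply PySem.List.foldl_congr_mem
  intro acc j _
  have e1 : ((j : Int) + 1) = ((j + 1 : Nat) : Int) := by push_cast; ring
  have e2 : ((j : Int) + 2) = ((j + 2 : Nat) : Int) := by push_cast; ring
  rw [e1, e2, PySem.List.pyGetD_natCast, PySem.List.pyGetD_natCast, PySem.List.pyGetD_natCast]
  rfl

theorem portA_eq (tokens : List (List String)) :
    formTrigramMap tokens =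
      ((tokens.flatMap tris).foldl trStep PySem.Dict.empty).items.map
        (fun p => (p.1, p.2.items.map (fun q => (q.1, q.2.items)))) := by
  unfold formTrigramMap
  dsimp only
  rw [PySem.List.foldl_pyRange_zero_pyGetD tokens ([] : List String)
    (fun m sent => (PySem.List.pyRange 0 (PySem.List.len sent - 2) 1).foldl (fun m j =>
      trInc3 m (PySem.List.pyGetD sent j "") (PySem.List.pyGetD sent (j + 1) "")
        (PySem.List.pyGetD sent (j + 2) "")) m) PySem.Dict.empty]
  have h : tokens.foldl (fun m sent =>
      (PySem.List.pyRange 0 (PySem.List.len sent - 2) 1).foldl (fun m j =>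
        trInc3 m (PySem.List.pyGetD sent j "") (PySem.List.pyGetD sent (j + 1) "")
          (PySem.List.pyGetD sent (j + 2) "")) m) PySem.Dict.empty =
      (tokens.flatMap tris).foldl trStep PySem.Dict.empty := by
    rw [List.foldl_flatMap]
    exact PySem.List.foldl_congr_mem _ _ _ _ (fun acc sent _ => inner_loop_eq sent acc)
  rw [h]

theorem portB_eq (tokens : List (List String)) :
    formTrigramMap_alt tokens =
      ((((tokens.flatMap tris).foldl cntTri PySem.Dict.empty).items).foldl reIns
          PySem.Dict.empty).items.map
        (fun p => (p.1, p.2.items.map (fun q => (q.1, q.2.items)))) := by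
  unfold formTrigramMap_alt
  dsimp only
  have h : tokens.foldl (fun d sent =>
      (List.zip sent (List.zip (PySem.List.slice sent (some 1) none)
        (PySem.List.slice sent (some 2) none))).foldl cntTri d) PySem.Dict.empty =
      (tokens.flatMap tris).foldl cntTri PySem.Dict.empty := by
    rw [List.foldl_flatMap]
    apply PySem.List.foldl_congr_mem
    intro acc sent _
    have h1 : PySem.List.slice sent (some 1) none = sent.drop 1 := by
      simpa using PySem.List.slice_from_natCast sent 1
    have h2 : PySem.List.slice sent (some 2) none = sent.drop 2 := by
      simpa using PySem.List.slice_from_natCast sent 2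
    simp only [tris]
    rw [h1, h2]
  rw [h]

-- ===== VERDICT (by name: the statement is the Claim_ definition above) =====
theorem formTrigramMap_spec : Claim_equal_formTrigramMap := by
  intro tokens _
  unfold Spec_formTrigramMap
  rw [portA_eq, portB_eq, reshape_counter]
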